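-- pv_equiv track=rewrite | github.com/pypi-data/pypi-mirror-77 | packages/hydra-core/hydra_core-1.0.0rc3-py3-none-any.whl/hydra/_internal/utils.py | get_column_widths
-- ===== SOURCE A (Python) =====
-- from typing import (
--     Any,
--     Callable,
--     List,
--     MutableMapping,
--     Optional,
--     Sequence,
--     Tuple,
--     Type,
--     Union,
-- )
--
-- def get_column_widths(matrix: List[List[str]]) -> List[int]:
--     num_cols = 0
--     for row in matrix:
--         num_cols = max(num_cols, len(row))
--     widths: List[int] = [0] * num_cols
--     for row in matrix:
--         for idx, col in enumerate(row):
--             widths[idx] = max(widths[idx], len(col))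
--
--     return widths
-- ===== SOURCE B (Python) =====
-- from itertools import zip_longest
-- from typing import List
--
--
-- def get_column_widths(matrix: List[List[str]]) -> List[int]:
--     return [
--         max((len(cell) for cell in col), default=0)
--         for col in zip_longest(*matrix, fillvalue="")
--     ]
-- ===== Notes on version B (the rewrite author's own statement) =====
-- stated objective: idiomatic
-- what changed: B transposes the matrix with itertools.zip_longest (padding short rows with "") and reduces each column group with one max(), replacing A's two passes (a num_cols scan plus a mutable widths array updated cell by cell in row-major order) with a single column-major comprehension.
import Mathlib
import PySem

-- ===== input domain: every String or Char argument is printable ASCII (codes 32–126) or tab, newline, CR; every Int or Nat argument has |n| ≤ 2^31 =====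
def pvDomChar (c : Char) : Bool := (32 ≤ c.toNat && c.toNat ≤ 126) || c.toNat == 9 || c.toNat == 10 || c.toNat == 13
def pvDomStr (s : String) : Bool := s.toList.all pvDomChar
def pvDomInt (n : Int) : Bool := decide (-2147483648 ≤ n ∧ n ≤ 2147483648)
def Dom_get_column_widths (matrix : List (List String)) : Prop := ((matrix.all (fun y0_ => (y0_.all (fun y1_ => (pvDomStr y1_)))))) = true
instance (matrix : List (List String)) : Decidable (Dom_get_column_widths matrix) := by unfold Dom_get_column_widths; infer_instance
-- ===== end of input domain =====

-- B computes the widths column-major over the zip_longest transpose instead of A's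
-- num_cols pass plus row-major updates of a mutable widths array (idiomatic; same cost).

-- ===== PORT A =====
-- every index `idx` from enumerate satisfies 0 ≤ idx < len(row) ≤ num_cols = widths.length,
-- so Python's widths[idx] read/assignment never raises; pyGetD / List.set are exact there.
def get_column_widths (matrix : List (List String)) : List Int :=
  let num_cols : Int := matrix.foldl (fun n row => max n ((row.length : Int))) 0
  let widths : List Int := List.replicate num_cols.toNat 0
  matrix.foldl (fun w row =>
    (PySem.List.enumerate row 0).foldl
      (fun w p => w.set p.1.toNat (max (PySem.List.pyGetD w p.1 0) (PySem.Str.len p.2))) w)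
    widths

-- ===== PORT B =====
-- zip_longest(*matrix, fillvalue=""): column j (for j below the longest row length) is the
-- tuple of row[j] over all rows, with "" where a row is too short; [] when matrix is empty.
def get_column_widths_alt (matrix : List (List String)) : List Int :=
  ((List.range ((matrix.map List.length).foldr Nat.max 0)).map
      (fun j => matrix.map (fun row => row.getD j ""))).map
    (fun col => PySem.List.maxD (col.map PySem.Str.len) id 0)

-- ===== PRECONDITION & SPEC =====
def Spec_get_column_widths (matrix : List (List String)) (out : List Int) : Prop := out = get_column_widths_alt matrix
instance (matrix : List (List String)) (out : List Int) : Decidable (Spec_get_column_widths matrix out) := by unfold Spec_get_column_widths; infer_instance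

-- ===== CLAIM (what is proved, stated in full; the proofs are below) =====
def Claim_equal_get_column_widths : Prop := ∀ (matrix : List (List String)), Dom_get_column_widths matrix → Spec_get_column_widths matrix (get_column_widths matrix)

-- ===== LEMMAS AND PROOFS =====

-- abbreviations for the two loop bodies (proof-local)
def pvStep (w : List Int) (p : Int × String) : List Int :=
  w.set p.1.toNat (max (PySem.List.pyGetD w p.1 0) (PySem.Str.len p.2))

def pvRowFold (w : List Int) (row : List String) : List Int :=
  (PySem.List.enumerate row 0).foldl pvStep w

-- column-major maximum of column j
def pvColMax (matrix : List (List String)) (j : Nat) : Int :=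
  matrix.foldl (fun a row => max a (PySem.Str.len (row.getD j ""))) 0

theorem pvStep_length (w : List Int) (p : Int × String) : (pvStep w p).length = w.length := by
  simp [pvStep]

theorem pvPairs_length (ps : List (Int × String)) (w : List Int) :
    (ps.foldl pvStep w).length = w.length := by
  induction ps generalizing w with
  | nil => rfl
  | cons p ps ih => simp [List.foldl_cons, ih, pvStep_length]

theorem pvRow_length (row : List String) (w : List Int) :
    (pvRowFold w row).length = w.length := pvPairs_length _ _

theorem pvFinal_length (matrix : List (List String)) (w : List Int) :
    (matrix.foldl pvRowFold w).length = w.length := by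
  induction matrix generalizing w with
  | nil => rfl
  | cons r rs ih => simp [List.foldl_cons, ih, pvRow_length]

theorem pvPairs_get (ps : List (Int × String)) (w : List Int) (j : Nat)
    (hj : j < w.length) (hps : ∀ p ∈ ps, 0 ≤ p.1) :
    (ps.foldl pvStep w).getD j 0
      = ps.foldl (fun a p => if p.1 = (j : Int) then max a (PySem.Str.len p.2) else a)
          (w.getD j 0) := by
  induction ps generalizing w with
  | nil => rfl
  | cons p ps ih =>
    have hp : 0 ≤ p.1 := hps p (List.mem_cons_self ..)
    have hlen : j < (pvStep w p).length := by simpa [pvStep_length] using hj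
    have hgd : (pvStep w p).getD j 0 =
        if p.1 = (j : Int) then max (w.getD j 0) (PySem.Str.len p.2) else w.getD j 0 := by
      rw [List.getD_eq_getElem _ _ hlen, List.getD_eq_getElem _ _ hj]
      by_cases h : p.1 = (j : Int)
      · have ht : p.1.toNat = j := by omega
        rw [if_pos h]
        simp [pvStep, ht, PySem.List.pyGetD_of_nonneg w _ hp,
              List.getElem?_eq_getElem hj]
      · have hne : p.1.toNat ≠ j := by omega
        rw [if_neg h]
        simp [pvStep, hne]
    rw [List.foldl_cons, List.foldl_cons,
        ih (pvStep w p) hlen (fun q hq => hps q (by simp [hq])), hgd]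

theorem pvEnum_if_fold (row : List String) (s : Int) (a : Int) (j : Nat) :
    (PySem.List.enumerate row s).foldl
        (fun a p => if p.1 = (j : Int) then max a (PySem.Str.len p.2) else a) a
      = if s ≤ (j : Int) ∧ (j : Int) < s + row.length
        then max a (PySem.Str.len (row.getD ((j : Int) - s).toNat ""))
        else a := by
  induction row generalizing s a with
  | nil =>
    simp only [PySem.List.enumerate_nil, List.foldl_nil, List.length_nil,
               Nat.cast_zero, add_zero]
    rw [if_neg (by omega)]
  | cons x xs ih =>
    rw [PySem.List.enumerate_cons, List.foldl_cons]
    by_cases h : s = (j : Int)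
    · have hc1 : ¬ (s + 1 ≤ (j : Int) ∧ (j : Int) < s + 1 + (xs.length : Int)) := by omega
      have hc2 : s ≤ (j : Int) ∧ (j : Int) < s + ((x :: xs).length : Int) := by
        simp only [List.length_cons]; push_cast; omega
      rw [if_pos (show (s, x).1 = (j : Int) from h), ih, if_neg hc1, if_pos hc2,
          show ((j : Int) - s).toNat = 0 by omega]
      rfl
    · rw [if_neg (show ¬ (s, x).1 = (j : Int) from h), ih]
      by_cases hc : s + 1 ≤ (j : Int) ∧ (j : Int) < s + 1 + (xs.length : Int)
      · have hc2 : s ≤ (j : Int) ∧ (j : Int) < s + ((x :: xs).length : Int) := by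
          simp only [List.length_cons]; push_cast; omega
        rw [if_pos hc, if_pos hc2,
            show ((j : Int) - s).toNat = ((j : Int) - (s + 1)).toNat + 1 by omega]
        rfl
      · have hc2 : ¬ (s ≤ (j : Int) ∧ (j : Int) < s + ((x :: xs).length : Int)) := by
          simp only [List.length_cons]; push_cast; omega
        rw [if_neg hc, if_neg hc2]

theorem pvRow_get (row : List String) (w : List Int) (j : Nat) (hj : j < w.length) :
    (pvRowFold w row).getD j 0
      = if (j : Int) < (row.length : Int)
        then max (w.getD j 0) (PySem.Str.len (row.getD j ""))
        else w.getD j 0 := by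
  rw [pvRowFold, pvPairs_get _ _ _ hj
        (by intro p hp
            rcases (PySem.List.mem_enumerate_iff _ _ _).1 hp with ⟨k, hk, rfl⟩
            simp),
      pvEnum_if_fold row 0, show ((j : Int) - 0).toNat = j by omega]
  by_cases h : (j : Int) < (row.length : Int)
  · rw [if_pos ⟨by omega, by omega⟩, if_pos h]
  · rw [if_neg (by omega), if_neg h]

theorem pvFinal_get (matrix : List (List String)) (w : List Int) (j : Nat) (hj : j < w.length) :
    (matrix.foldl pvRowFold w).getD j 0
      = matrix.foldl
          (fun a row => if (j : Int) < (row.length : Int)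
                        then max a (PySem.Str.len (row.getD j "")) else a)
          (w.getD j 0) := by
  induction matrix generalizing w with
  | nil => rfl
  | cons r rs ih =>
    rw [List.foldl_cons, List.foldl_cons,
        ih (pvRowFold w r) (by simpa [pvRow_length] using hj), pvRow_get r w j hj]

theorem pvDrop_if (matrix : List (List String)) (j : Nat) (a : Int) (ha : 0 ≤ a) :
    matrix.foldl
        (fun a row => if (j : Int) < (row.length : Int)
                      then max a (PySem.Str.len (row.getD j "")) else a) a
      = matrix.foldl (fun a row => max a (PySem.Str.len (row.getD j ""))) a := by
  induction matrix generalizing a with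
  | nil => rfl
  | cons r rs ih =>
    rw [List.foldl_cons, List.foldl_cons]
    by_cases h : (j : Int) < (r.length : Int)
    · rw [if_pos h]; exact ih _ (le_trans ha (le_max_left _ _))
    · rw [if_neg h, List.getD_eq_default _ _ (by omega : r.length ≤ j),
          show PySem.Str.len "" = 0 by rfl, max_eq_left ha]
      exact ih a ha

-- num_cols (A's Int fold) equals the longest row length (B's Nat fold)
theorem pvNum_cols (matrix : List (List String)) (a : Int) (ha : 0 ≤ a) :
    matrix.foldl (fun n row => max n ((row.length : Int))) a
      = max a (((matrix.map List.length).foldr Nat.max 0 : Nat) : Int) := by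
  induction matrix generalizing a with
  | nil => simp [max_eq_left ha]
  | cons r rs ih =>
    rw [List.foldl_cons, ih _ (le_trans ha (le_max_left _ _))]
    simp only [List.map_cons, List.foldr_cons]
    rw [show Nat.max r.length ((rs.map List.length).foldr Nat.max 0)
          = max r.length ((rs.map List.length).foldr Nat.max 0) from rfl]
    push_cast [Nat.cast_max]
    rw [max_assoc]

def pvF : Option Int → Int → Option Int := fun acc y =>
  match acc with
  | none => some y
  | some m => if (id m : Int) < id y then some y else some m

theorem pvMax?_eq_foldl_pvF (xs : List Int) :
    PySem.List.max? xs (id : Int → Int) = xs.foldl pvF none := by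
  simp only [PySem.List.max?]
  congr 1
  funext acc y
  cases acc <;> rfl

theorem pvF_some (m y : Int) : pvF (some m) y = some (max m y) := by
  simp only [pvF, id_eq]
  by_cases hmy : m < y
  · rw [if_pos hmy, max_eq_right hmy.le]
  · rw [if_neg hmy, max_eq_left (le_of_not_gt hmy)]

theorem pvMax?_aux (t : List Int) (m : Int) :
    t.foldl pvF (some m) = some (t.foldl max m) := by
  induction t generalizing m with
  | nil => rfl
  | cons y ys ih => rw [List.foldl_cons, List.foldl_cons, pvF_some, ih]

theorem pvMax?_foldl (xs : List Int) (x : Int) :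
    PySem.List.max? (x :: xs) (id : Int → Int) = some (xs.foldl max x) := by
  rw [pvMax?_eq_foldl_pvF, List.foldl_cons, show pvF none x = some x from rfl, pvMax?_aux]

theorem pvMaxD_eq_foldl (xs : List Int) (h : ∀ x ∈ xs, 0 ≤ x) :
    PySem.List.maxD xs id 0 = xs.foldl max 0 := by
  cases xs with
  | nil => rfl
  | cons x t =>
    have hx : 0 ≤ x := h x (List.mem_cons_self ..)
    rw [PySem.List.maxD, pvMax?_foldl, Option.getD_some, List.foldl_cons,
        max_eq_right hx]

-- B's entry j equals the column-major maximum
theorem pvAlt_elem (matrix : List (List String)) (j : Nat) :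
    PySem.List.maxD ((matrix.map (fun row => row.getD j "")).map PySem.Str.len) id 0
      = pvColMax matrix j := by
  rw [pvMaxD_eq_foldl _ (by
      intro x hx
      simp only [List.mem_map] at hx
      rcases hx with ⟨s, hs, rfl⟩
      rcases hs with ⟨r, hr, rfl⟩
      simp [PySem.Str.len_eq])]
  rw [List.foldl_map, List.foldl_map, pvColMax]

-- ===== VERDICT (by name: the statement is the Claim_ definition above) =====
theorem get_column_widths_spec : Claim_equal_get_column_widths := by
  intro matrix _
  unfold Spec_get_column_widths get_column_widths get_column_widths_alt
  set M : Nat := (matrix.map List.length).foldr Nat.max 0 with hM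
  have hN : (matrix.foldl (fun n row => max n ((row.length : Int))) 0).toNat = M := by
    rw [pvNum_cols matrix 0 le_rfl, max_eq_right (by positivity), Int.toNat_natCast]
  show matrix.foldl pvRowFold (List.replicate _ 0) = _
  rw [hN]
  apply List.ext_getElem
  · rw [pvFinal_length]; simp
  · intro j h1 h2
    have hjM : j < M := by simpa [pvFinal_length] using h1
    have hjw : j < (List.replicate M (0 : Int)).length := by simpa using hjM
    rw [← List.getD_eq_getElem _ 0 h1, pvFinal_get matrix _ j hjw,
        List.getD_replicate, pvDrop_if matrix j 0 le_rfl]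
    rw [List.getElem_map, List.getElem_map, List.getElem_range, pvAlt_elem]
    rfl
    exact hjM
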